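-- pv_equiv track=rewrite | github.com/shaunharker/languagemodels | languagemodels/data.py | blackboardadditionadvice
-- ===== SOURCE A (Python) =====
-- def blackboardadditionadvice(x, y):
--     if x < y:
--         x, y = y, x
--
--     n = len(str(x))
--
--     sy = ' '*(n-len(str(y))) + str(y)
--
--     carryline = " "*(n+1) + "\n"
--     bbproblem = f"  {x}\n+ {sy}\n" + "-"*(n+2) + "\n"
--     resultline = " "*(n+2) + "\n"
--     advice = f"\nStep 0:\n{carryline}{bbproblem}{resultline}"
--     c = 0
--     for k in range(n):
--         a = int(str(x)[-k-1])
--         try: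
--             b = int(str(y)[-k-1])
--         except:
--             b = 0
--         d = (a + b + c)%10
--         oldc = c
--         c = (a + b + c)//10
--         if c != 0:
--             if k < n-1:
--                 carryline = carryline[:-k-2] + str(c) + carryline[-k-1:]
--             else:
--                 resultline = ' 1' + resultline[2:]
--         resultline = resultline[:-k-2] + str(d) + resultline[-k-1:]
--         equat = ""
--         if oldc > 0:
--             equat += f"{oldc}+"
--         equat += f"{a}"
--         equat += f"+{b}"
--         equat += f"={oldc+a+b}"
--         advice += f"\nStep {k+1}: {equat}\n{carryline}{bbproblem}{resultline}"
--     return advice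
-- ===== SOURCE B (Python) =====
-- # Two-pass reimplementation: pass 1 computes all per-column digits/carries once;
-- # pass 2 renders the worksheet by writing single characters into fixed-size
-- # carry/result buffers instead of re-slicing strings.  (Return value only; same
-- # output as the original wherever it returns, i.e. unless both inputs are negative.)
-- def blackboardadditionadvice(x, y):
--     if x < y:
--         x, y = y, x
--     sx = str(x)
--     sy = str(y)
--     n = len(sx)
--
--     # pass 1: the whole addition, column by column
--     steps = []
--     c = 0
--     for k in range(n):
--         a = int(sx[-k - 1])
--         ch = sy[-k - 1] if k < len(sy) else ''
--         b = int(ch) if ch.isdigit() else 0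
--         d = (a + b + c) % 10
--         c2 = (a + b + c) // 10
--         steps.append((a, b, c, d, c2))
--         c = c2
--
--     # pass 2: render
--     bbproblem = f"  {sx}\n+ {' ' * (n - len(sy)) + sy}\n" + "-" * (n + 2) + "\n"
--     carrybuf = [' '] * (n + 1)
--     resbuf = [' '] * (n + 2)
--     pieces = ["\nStep 0:\n" + ''.join(carrybuf) + "\n" + bbproblem + ''.join(resbuf) + "\n"]
--     for k, (a, b, oldc, d, c2) in enumerate(steps):
--         if c2 != 0 and k < n - 1:
--             carrybuf[n - k] = chr(c2 + 48)
--         if c2 != 0 and not (k < n - 1):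
--             resbuf[0] = ' '
--             resbuf[1] = '1'
--         resbuf[n + 1 - k] = chr(d + 48)
--         if oldc > 0:
--             equat = f"{oldc}+{a}+{b}={oldc + a + b}"
--         else:
--             equat = f"{a}+{b}={oldc + a + b}"
--         pieces.append(f"\nStep {k + 1}: {equat}\n" + ''.join(carrybuf) + "\n"
--                       + bbproblem + ''.join(resbuf) + "\n")
--     return ''.join(pieces)
-- ===== Notes on version B (the rewrite author's own statement) =====
-- stated objective: alternative
-- what changed: B splits A's single fused loop into a compute pass (all column digits, sums and carries collected once) and a render pass that writes single characters into fixed-size carry/result buffers, replacing A's per-step string slice-and-concatenate surgery; Pre_ excludes only inputs where A raises (both arguments negative: int('-') ValueError).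
import Mathlib
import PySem

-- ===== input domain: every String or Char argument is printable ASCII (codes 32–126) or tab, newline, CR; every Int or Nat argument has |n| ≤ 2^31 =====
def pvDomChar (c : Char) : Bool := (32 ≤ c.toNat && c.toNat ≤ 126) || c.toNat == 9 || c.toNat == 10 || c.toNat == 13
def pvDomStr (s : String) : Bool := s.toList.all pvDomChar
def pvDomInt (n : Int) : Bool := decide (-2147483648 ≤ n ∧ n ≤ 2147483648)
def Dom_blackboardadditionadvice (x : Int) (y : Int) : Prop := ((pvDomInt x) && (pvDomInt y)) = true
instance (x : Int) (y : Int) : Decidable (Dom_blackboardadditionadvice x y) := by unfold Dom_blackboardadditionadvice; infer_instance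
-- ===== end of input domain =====

-- B changes only the decomposition (compute all digits/carries first, then render into
-- character buffers instead of re-slicing strings); same return value wherever A returns.

-- ===== PORT A =====
-- the body of A's for-loop, step for step (st = (carryline, resultline, c, advice))
def pvStepA (sx sy : List Char) (n : Nat) (bb : List Char)
    (st : List Char × List Char × Int × List Char) (k : Int) :
    List Char × List Char × Int × List Char :=
  -- a = int(str(x)[-k-1])  (in range and a digit under Pre_, so the getD 0 is never taken)
  let a := ((PySem.List.pyGet? sx (-k-1)).bind (fun ch => PySem.Int.ofChars? [ch])).getD 0
  -- try: b = int(str(y)[-k-1]) except: b = 0  — none (IndexError or ValueError) becomes 0, exactly the except branch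
  let b := ((PySem.List.pyGet? sy (-k-1)).bind (fun ch => PySem.Int.ofChars? [ch])).getD 0
  let d := PySem.Int.mod (a + b + st.2.2.1) 10
  let oldc := st.2.2.1
  let c := PySem.Int.floordiv (a + b + st.2.2.1) 10
  let cr : List Char × List Char :=
    if c ≠ 0 then
      if k < (n : Int) - 1 then
        (PySem.List.slice st.1 none (some (-k-2)) ++ PySem.Int.toChars c ++
           PySem.List.slice st.1 (some (-k-1)) none, st.2.1)
      else (st.1, ' ' :: '1' :: PySem.List.slice st.2.1 (some 2) none)
    else (st.1, st.2.1)
  let resultline := PySem.List.slice cr.2 none (some (-k-2)) ++ PySem.Int.toChars d ++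
      PySem.List.slice cr.2 (some (-k-1)) none
  let equat := (if oldc > 0 then PySem.Int.toChars oldc ++ "+".toList else []) ++
      PySem.Int.toChars a ++ "+".toList ++ PySem.Int.toChars b ++ "=".toList ++
      PySem.Int.toChars (oldc + a + b)
  (cr.1, resultline, c,
    st.2.2.2 ++ "\nStep ".toList ++ PySem.Int.toChars (k + 1) ++ ": ".toList ++ equat ++
      "\n".toList ++ cr.1 ++ bb ++ resultline)

def blackboardadditionadvice (x : Int) (y : Int) : String :=
  let X := if x < y then y else x        -- if x < y: x, y = y, x
  let Y := if x < y then x else y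
  let sx := PySem.Int.toChars X          -- str(x)
  let n := sx.length                     -- n = len(str(x))
  let sy0 := PySem.Int.toChars Y         -- str(y)
  let sy := List.replicate (n - sy0.length) ' ' ++ sy0   -- ' '*(n-len(str(y))) + str(y)
  let carryline := List.replicate (n+1) ' ' ++ "\n".toList
  let bbproblem := "  ".toList ++ sx ++ "\n+ ".toList ++ sy ++ "\n".toList ++
      List.replicate (n+2) '-' ++ "\n".toList
  let resultline := List.replicate (n+2) ' ' ++ "\n".toList
  let advice := "\nStep 0:\n".toList ++ carryline ++ bbproblem ++ resultline
  let st := (PySem.List.pyRange 0 (n : Int) 1).foldl (pvStepA sx sy0 n bbproblem)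
      (carryline, resultline, 0, advice)
  String.ofList st.2.2.2

-- ===== PORT B =====
-- pass 1 loop body: p = (carry so far, steps so far); appends (a, b, oldc, d, c2)
def pvStepB1 (sx sy : List Char) (p : Int × List (Int × Int × Int × Int × Int)) (k : Int) :
    Int × List (Int × Int × Int × Int × Int) :=
  let a := ((PySem.List.pyGet? sx (-k-1)).bind (fun ch => PySem.Int.ofChars? [ch])).getD 0
  -- ch = sy[-k-1] if k < len(sy) else ''; b = int(ch) if ch.isdigit() else 0
  let b := if k < PySem.List.len sy then
      (let ch := PySem.List.pyGetD sy (-k-1) ' '   -- in range under the guard (k ≥ 0 in the loop)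
       if PySem.Chars.isdigit ch then (PySem.Int.ofChars? [ch]).getD 0 else 0)
    else 0
  let d := PySem.Int.mod (a + b + p.1) 10
  let c2 := PySem.Int.floordiv (a + b + p.1) 10
  (c2, p.2 ++ [(a, b, p.1, d, c2)])

-- pass 2 loop body: st = (carrybuf, resbuf, output); e = (k, (a, b, oldc, d, c2))
def pvStepB2 (n : Nat) (bb : List Char) (st : List Char × List Char × List Char)
    (e : Int × Int × Int × Int × Int × Int) : List Char × List Char × List Char :=
  let k := e.1
  let a := e.2.1
  let b := e.2.2.1
  let oldc := e.2.2.2.1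
  let d := e.2.2.2.2.1
  let c2 := e.2.2.2.2.2
  -- carrybuf[n-k] = chr(c2+48);  chr on a value in 48..57 is exactly Char.ofNat
  let cb := if c2 ≠ 0 ∧ k < (n : Int) - 1 then
      PySem.List.pySetD st.1 ((n : Int) - k) (Char.ofNat (c2.toNat + 48)) else st.1
  let rb := if c2 ≠ 0 ∧ ¬ (k < (n : Int) - 1) then
      PySem.List.pySetD (PySem.List.pySetD st.2.1 0 ' ') 1 '1' else st.2.1
  let rb := PySem.List.pySetD rb ((n : Int) + 1 - k) (Char.ofNat (d.toNat + 48))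
  let equat := if oldc > 0 then
      PySem.Int.toChars oldc ++ "+".toList ++ PySem.Int.toChars a ++ "+".toList ++
        PySem.Int.toChars b ++ "=".toList ++ PySem.Int.toChars (oldc + a + b)
    else PySem.Int.toChars a ++ "+".toList ++ PySem.Int.toChars b ++ "=".toList ++
        PySem.Int.toChars (oldc + a + b)
  (cb, rb,
    st.2.2 ++ "\nStep ".toList ++ PySem.Int.toChars (k + 1) ++ ": ".toList ++ equat ++
      "\n".toList ++ (cb ++ "\n".toList) ++ bb ++ (rb ++ "\n".toList))

def blackboardadditionadvice_alt (x : Int) (y : Int) : String :=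
  let X := if x < y then y else x
  let Y := if x < y then x else y
  let sx := PySem.Int.toChars X
  let sy := PySem.Int.toChars Y
  let n := sx.length
  let steps := ((PySem.List.pyRange 0 (n : Int) 1).foldl (pvStepB1 sx sy) (0, [])).2
  let bb := "  ".toList ++ sx ++ "\n+ ".toList ++ (List.replicate (n - sy.length) ' ' ++ sy) ++
      "\n".toList ++ List.replicate (n+2) '-' ++ "\n".toList
  let st := (PySem.List.enumerate steps 0).foldl (pvStepB2 n bb)
      (List.replicate (n+1) ' ', List.replicate (n+2) ' ',
       "\nStep 0:\n".toList ++ (List.replicate (n+1) ' ' ++ "\n".toList) ++ bb ++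
         (List.replicate (n+2) ' ' ++ "\n".toList))
  String.ofList st.2.2

-- ===== PRECONDITION & SPEC =====
-- Pre_ excludes exactly the inputs where A raises: both arguments negative, so the '-' of
-- str(x) reaches int() at the last step (ValueError).  A returns on every other input.
def Pre_blackboardadditionadvice (x : Int) (y : Int) : Prop := 0 ≤ x ∨ 0 ≤ y
instance (x : Int) (y : Int) : Decidable (Pre_blackboardadditionadvice x y) := by
  unfold Pre_blackboardadditionadvice; infer_instance
def pvWitness_blackboardadditionadvice : Int × Int := (12, 9)

def Spec_blackboardadditionadvice (x : Int) (y : Int) (out : String) : Prop :=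
  out = blackboardadditionadvice_alt x y
instance (x : Int) (y : Int) (out : String) : Decidable (Spec_blackboardadditionadvice x y out) := by
  unfold Spec_blackboardadditionadvice; infer_instance

-- ===== CLAIM (what is proved, stated in full; the proofs are below) =====
def Claim_equal_blackboardadditionadvice : Prop :=
  ∀ (x : Int) (y : Int), Dom_blackboardadditionadvice x y →
    Pre_blackboardadditionadvice x y →
    Spec_blackboardadditionadvice x y (blackboardadditionadvice x y)

-- ===== LEMMAS AND PROOFS =====

-- int(c) for a decimal digit character c
lemma pvOfChars_digit (c : Char) (h : c.isDigit = true) :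
    PySem.Int.ofChars? [c] = some ((c.toNat : Int) - 48) := by
  have h2 : 48 ≤ c.toNat ∧ c.toNat ≤ 57 := by
    simpa [Char.isDigit, Char.le_def] using h
  have hc : Char.ofNat c.toNat = c := Char.ofNat_toNat c
  obtain ⟨h3, h4⟩ := h2
  set m := c.toNat with hm
  clear_value m
  interval_cases m <;> (rw [← hc]; decide)

lemma pvIsdigit_eq (c : Char) (h : c.isDigit = true) : PySem.Chars.isdigit c = true := by
  simpa [PySem.Chars.isdigit, Char.isDigit, Char.le_def] using h

lemma pvToChars_digit (d : Int) (h0 : 0 ≤ d) (h9 : d < 10) :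
    PySem.Int.toChars d = [Char.ofNat (d.toNat + 48)] := by
  interval_cases d <;> decide

lemma pvSetD_eq_set {α : Type} (xs : List α) (i : Int) (v : α) (h0 : 0 ≤ i)
    (h : i < (xs.length : Int)) : PySem.List.pySetD xs i v = xs.set i.toNat v := by
  simp [PySem.List.pySetD, PySem.List.pySet?, PySem.List.pyIdx?, h0, h]

-- A's two-slice splice on a '\n'-terminated line is a single buffer write
lemma pvSplice (buf : List Char) (k : Nat) (ch : Char) (h : k < buf.length) :
    PySem.List.slice (buf ++ ['\n']) none (some (-(k : Int)-2)) ++ [ch] ++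
      PySem.List.slice (buf ++ ['\n']) (some (-(k : Int)-1)) none
    = buf.set (buf.length - (k+1)) ch ++ ['\n'] := by
  have e2 : (-(k : Int)-2) = -(((k+2 : Nat)) : Int) := by push_cast; ring
  have e1 : (-(k : Int)-1) = -(((k+1 : Nat)) : Int) := by push_cast; ring
  rw [e2, e1, PySem.List.slice_to_neg_natCast _ _ (by omega),
    PySem.List.slice_from_neg_natCast _ _ (by omega)]
  simp only [List.length_append, List.length_cons, List.length_nil]
  rw [List.take_append_of_le_length (by omega), List.drop_append_of_le_length (by omega),
    List.set_eq_take_append_cons_drop, if_pos (by omega)]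
  have h1 : buf.length + 1 - (k + 2) = buf.length - (k + 1) := by omega
  have h2 : buf.length + 1 - (k + 1) = buf.length - (k + 1) + 1 := by omega
  rw [h1, h2]
  simp


lemma pvSet01 (rb : List Char) (h : 2 ≤ rb.length) :
    (rb.set 0 ' ').set 1 '1' = ' ' :: '1' :: rb.drop 2 := by
  match rb, h with
  | r0 :: r1 :: rest, _ => simp

-- canonical values of one rendering step (shared by both step lemmas)
def pvCb' (cb : List Char) (n m : Nat) (c2 : Int) : List Char :=
  if c2 ≠ 0 ∧ (m : Int) < (n : Int) - 1 then cb.set (n - m) '1' else cb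

def pvRb' (rb : List Char) (n m : Nat) (dv c2 : Int) : List Char :=
  (if c2 ≠ 0 ∧ ¬ ((m : Int) < (n : Int) - 1) then (rb.set 0 ' ').set 1 '1' else rb).set
    (n + 1 - m) (Char.ofNat (dv.toNat + 48))

def pvEquat (a b oldc : Int) : List Char :=
  if oldc > 0 then
    PySem.Int.toChars oldc ++ "+".toList ++ PySem.Int.toChars a ++ "+".toList ++
      PySem.Int.toChars b ++ "=".toList ++ PySem.Int.toChars (oldc + a + b)
  else PySem.Int.toChars a ++ "+".toList ++ PySem.Int.toChars b ++ "=".toList ++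
      PySem.Int.toChars (oldc + a + b)

lemma pvB1_step (sx sy : List Char) (steps : List (Int × Int × Int × Int × Int))
    (m : Nat) (av bv c dv c2 : Int)
    (ha : ((PySem.List.pyGet? sx (-(m : Int)-1)).bind (fun ch => PySem.Int.ofChars? [ch])).getD 0 = av)
    (hb : (if (m : Int) < PySem.List.len sy then
        (if PySem.Chars.isdigit (PySem.List.pyGetD sy (-(m : Int)-1) ' ') then
          (PySem.Int.ofChars? [PySem.List.pyGetD sy (-(m : Int)-1) ' ']).getD 0 else 0)
      else 0) = bv)
    (hd : PySem.Int.mod (av + bv + c) 10 = dv)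
    (hc2 : PySem.Int.floordiv (av + bv + c) 10 = c2) :
    pvStepB1 sx sy (c, steps) (m : Int) = (c2, steps ++ [(av, bv, c, dv, c2)]) := by
  simp only [pvStepB1]
  rw [ha, hb, hd, hc2]

lemma pvB2_step (n m : Nat) (bb cb rb out : List Char) (av bv c dv c2 : Int)
    (hcb : cb.length = n+1) (hrb : rb.length = n+2) (hm : m < n)
    (hc2 : c2 = 0 ∨ c2 = 1) :
    pvStepB2 n bb (cb, rb, out) ((m : Int), av, bv, c, dv, c2) =
      (pvCb' cb n m c2, pvRb' rb n m dv c2,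
        out ++ "\nStep ".toList ++ PySem.Int.toChars ((m : Int) + 1) ++ ": ".toList ++
          pvEquat av bv c ++ "\n".toList ++ (pvCb' cb n m c2 ++ "\n".toList) ++ bb ++
          (pvRb' rb n m dv c2 ++ "\n".toList)) := by
  have hcbEq : (if c2 ≠ 0 ∧ (m : Int) < (n : Int) - 1 then
      PySem.List.pySetD cb ((n : Int) - (m : Int)) (Char.ofNat (c2.toNat + 48)) else cb)
      = pvCb' cb n m c2 := by
    unfold pvCb'
    split_ifs with h
    · have h1 : c2 = 1 := by rcases hc2 with h' | h' <;> omega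
      rw [pvSetD_eq_set _ _ _ (by omega) (by rw [hcb]; push_cast; omega)]
      have h2 : ((n : Int) - (m : Int)).toNat = n - m := by omega
      rw [h2, h1]
      rfl
    · rfl
  have hrbEq : PySem.List.pySetD
      (if c2 ≠ 0 ∧ ¬ ((m : Int) < (n : Int) - 1) then
        PySem.List.pySetD (PySem.List.pySetD rb 0 ' ') 1 '1' else rb)
      ((n : Int) + 1 - (m : Int)) (Char.ofNat (dv.toNat + 48)) = pvRb' rb n m dv c2 := by
    unfold pvRb'
    have hset0 : PySem.List.pySetD rb 0 ' ' = rb.set 0 ' ' := by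
      rw [pvSetD_eq_set _ _ _ (by omega) (by rw [hrb]; push_cast; omega)]; rfl
    have hset1 : PySem.List.pySetD (rb.set 0 ' ') 1 '1' = (rb.set 0 ' ').set 1 '1' := by
      rw [pvSetD_eq_set _ _ _ (by omega) (by simp [hrb]; omega)]; rfl
    have hlen2 : (if c2 ≠ 0 ∧ ¬ ((m : Int) < (n : Int) - 1) then (rb.set 0 ' ').set 1 '1' else rb).length = n + 2 := by
      split_ifs <;> simp [hrb]
    rw [hset0, hset1, pvSetD_eq_set _ _ _ (by omega) (by rw [hlen2]; push_cast; omega)]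
    have h2 : ((n : Int) + 1 - (m : Int)).toNat = n + 1 - m := by omega
    rw [h2]
  simp only [pvStepB2]
  rw [hcbEq, hrbEq]
  rfl

lemma pvA_step (sx sy bb cb rb out : List Char) (n m : Nat) (av bv c dv c2 : Int)
    (ha : ((PySem.List.pyGet? sx (-(m : Int)-1)).bind (fun ch => PySem.Int.ofChars? [ch])).getD 0 = av)
    (hb : ((PySem.List.pyGet? sy (-(m : Int)-1)).bind (fun ch => PySem.Int.ofChars? [ch])).getD 0 = bv)
    (hd : PySem.Int.mod (av + bv + c) 10 = dv)
    (hc2v : PySem.Int.floordiv (av + bv + c) 10 = c2)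
    (hcb : cb.length = n+1) (hrb : rb.length = n+2) (hm : m < n)
    (hc2 : c2 = 0 ∨ c2 = 1) (hd0 : 0 ≤ dv) (hd9 : dv < 10) :
    pvStepA sx sy n bb (cb ++ "\n".toList, rb ++ "\n".toList, c, out) (m : Int) =
      (pvCb' cb n m c2 ++ "\n".toList, pvRb' rb n m dv c2 ++ "\n".toList, c2,
        out ++ "\nStep ".toList ++ PySem.Int.toChars ((m : Int) + 1) ++ ": ".toList ++
          pvEquat av bv c ++ "\n".toList ++ (pvCb' cb n m c2 ++ "\n".toList) ++ bb ++
          (pvRb' rb n m dv c2 ++ "\n".toList)) := by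
  have hNL : ("\n".toList : List Char) = ['\n'] := rfl
  have hdch : PySem.Int.toChars dv = [Char.ofNat (dv.toNat + 48)] := pvToChars_digit dv hd0 hd9
  simp only [pvStepA, hNL]
  rw [ha, hb, hd, hc2v, hdch]
  by_cases hcc : c2 = 0
  · -- no carry out: neither line surgery in the if, only the d write
    rw [if_neg (by simp [hcc])]
    try simp only []
    have hsp := pvSplice rb m (Char.ofNat (dv.toNat + 48)) (by omega)
    try simp only []
    rw [hsp, hrb]
    have h2 : n + 2 - (m + 1) = n + 1 - m := by omega
    rw [h2]
    have hcbE : pvCb' cb n m c2 = cb := by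
      unfold pvCb'; rw [if_neg (fun h => h.1 hcc)]
    have hrbE : pvRb' rb n m dv c2 = rb.set (n + 1 - m) (Char.ofNat (dv.toNat + 48)) := by
      unfold pvRb'; rw [if_neg (fun h => h.1 hcc)]
    rw [hcbE, hrbE]
    unfold pvEquat
    by_cases hcp : c > 0 <;> simp [hcp, List.append_assoc]
  · have h1 : c2 = 1 := by rcases hc2 with h' | h' <;> omega
    rw [if_pos hcc]
    by_cases hlt : (m : Int) < (n : Int) - 1
    · -- carry written into carryline
      rw [if_pos hlt]
      have hsc : PySem.Int.toChars c2 = ['1'] := by rw [h1]; decide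
      rw [hsc]
      have hspc := pvSplice cb m '1' (by omega)
      have hspr := pvSplice rb m (Char.ofNat (dv.toNat + 48)) (by omega)
      try simp only []
      rw [hspc, hspr, hcb, hrb]
      have h2 : n + 1 - (m + 1) = n - m := by omega
      have h3 : n + 2 - (m + 1) = n + 1 - m := by omega
      rw [h2, h3]
      have hcbE : pvCb' cb n m c2 = cb.set (n - m) '1' := by
        unfold pvCb'; rw [if_pos (And.intro hcc hlt)]
      have hrbE : pvRb' rb n m dv c2 = rb.set (n + 1 - m) (Char.ofNat (dv.toNat + 48)) := by
        unfold pvRb'; rw [if_neg (fun h => h.2 hlt)]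
      rw [hcbE, hrbE]
      unfold pvEquat
      by_cases hcp : c > 0 <;> simp [hcp, List.append_assoc]
    · -- final overflow: ' 1' written into the result line
      rw [if_neg hlt]
      have hdrop : PySem.List.slice (rb ++ ['\n']) (some 2) none = rb.drop 2 ++ ['\n'] := by
        rw [PySem.List.slice_from _ (by norm_num : (0:Int) ≤ 2)]
        rw [List.drop_append_of_le_length (by omega)]
        rfl
      rw [hdrop]
      have hline : ' ' :: '1' :: (rb.drop 2 ++ ['\n']) = ((rb.set 0 ' ').set 1 '1') ++ ['\n'] := by
        rw [pvSet01 rb (by omega)]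
        rfl
      rw [hline]
      try simp only []
      have hspr := pvSplice ((rb.set 0 ' ').set 1 '1') m (Char.ofNat (dv.toNat + 48)) (by simp [hrb]; omega)
      try simp only []
      rw [hspr]
      have hlen2 : ((rb.set 0 ' ').set 1 '1').length = n + 2 := by simp [hrb]
      rw [hlen2]
      have h3 : n + 2 - (m + 1) = n + 1 - m := by omega
      rw [h3]
      have hcbE : pvCb' cb n m c2 = cb := by
        unfold pvCb'; rw [if_neg (fun h => hlt h.2)]
      have hrbE : pvRb' rb n m dv c2 =
          ((rb.set 0 ' ').set 1 '1').set (n + 1 - m) (Char.ofNat (dv.toNat + 48)) := by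
        unfold pvRb'; rw [if_pos (And.intro hcc hlt)]
      rw [hcbE, hrbE]
      unfold pvEquat
      by_cases hcp : c > 0 <;> simp [hcp, List.append_assoc]

def pvInit (n : Nat) (bb : List Char) : List Char :=
  "\nStep 0:\n".toList ++ (List.replicate (n+1) ' ' ++ "\n".toList) ++ bb ++
    (List.replicate (n+2) ' ' ++ "\n".toList)

-- the joint loop invariant: after m steps the two computations agree
lemma pvInv (sx sy bb : List Char) (n : Nat)
    (hsx : ∀ c ∈ sx, c.isDigit = true)
    (hsy : ∀ c ∈ sy, c = '-' ∨ c.isDigit = true)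
    (hn : n = sx.length) :
    ∀ m : Nat, m ≤ n →
    ∃ cb rb out c steps,
      (PySem.List.pyRange 0 (m : Int) 1).foldl (pvStepB1 sx sy) (0, []) = (c, steps) ∧
      (PySem.List.enumerate steps 0).foldl (pvStepB2 n bb)
        (List.replicate (n+1) ' ', List.replicate (n+2) ' ', pvInit n bb) = (cb, rb, out) ∧
      (PySem.List.pyRange 0 (m : Int) 1).foldl (pvStepA sx sy n bb)
        (List.replicate (n+1) ' ' ++ "\n".toList, List.replicate (n+2) ' ' ++ "\n".toList, 0,
          pvInit n bb)
        = (cb ++ "\n".toList, rb ++ "\n".toList, c, out) ∧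
      cb.length = n+1 ∧ rb.length = n+2 ∧ 0 ≤ c ∧ c ≤ 1 ∧ steps.length = m := by
  intro m
  induction m with
  | zero =>
    intro _
    refine ⟨List.replicate (n+1) ' ', List.replicate (n+2) ' ', pvInit n bb, 0, [],
      ?_, rfl, ?_, by simp, by simp, le_refl 0, by norm_num, rfl⟩
    · norm_num [PySem.List.pyRange]
    · norm_num [PySem.List.pyRange]
  | succ m ih =>
    intro hm1
    obtain ⟨cb, rb, out, c, steps, hB1, hB2, hA, hcb, hrb, hc0, hc1, hlen⟩ := ih (by omega)
    have hmx : m < sx.length := by omega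
    have hcast : (-(m : Int) - 1) = -(((m+1 : Nat) : Int)) := by push_cast; ring
    -- the x digit of this column
    obtain ⟨av, haval, hav0, hav9⟩ :
        ∃ av : Int,
          ((PySem.List.pyGet? sx (-(m : Int)-1)).bind
            (fun ch => PySem.Int.ofChars? [ch])).getD 0 = av ∧ 0 ≤ av ∧ av ≤ 9 := by
      have hgx : PySem.List.pyGet? sx (-(m : Int)-1) = some (sx[sx.length - (m+1)]'(by omega)) := by
        rw [hcast, PySem.List.pyGet?_neg_natCast sx (m+1) (by omega) (by omega)]
        exact List.getElem?_eq_getElem _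
      have hAdig : (sx[sx.length - (m+1)]'(by omega)).isDigit = true :=
        hsx _ (List.getElem_mem _)
      have hav0 : 48 ≤ (sx[sx.length - (m+1)]'(by omega)).toNat ∧
          (sx[sx.length - (m+1)]'(by omega)).toNat ≤ 57 := by
        simpa [Char.isDigit, Char.le_def] using hAdig
      refine ⟨((sx[sx.length - (m+1)]'(by omega)).toNat : Int) - 48, ?_, by omega, by omega⟩
      rw [hgx]
      simp only [Option.bind_some]
      rw [pvOfChars_digit _ hAdig]
      rfl
    obtain ⟨bv, hbA, hbB, hbv0, hbv9⟩ :
        ∃ bv : Int,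
          ((PySem.List.pyGet? sy (-(m : Int)-1)).bind
            (fun ch => PySem.Int.ofChars? [ch])).getD 0 = bv ∧
          (if (m : Int) < PySem.List.len sy then
            (if PySem.Chars.isdigit (PySem.List.pyGetD sy (-(m : Int)-1) ' ') then
              (PySem.Int.ofChars? [PySem.List.pyGetD sy (-(m : Int)-1) ' ']).getD 0 else 0)
          else 0) = bv ∧ 0 ≤ bv ∧ bv ≤ 9 := by
      by_cases hin : m < sy.length
      · have hgy : PySem.List.pyGet? sy (-(m : Int)-1) = some (sy[sy.length - (m+1)]'(by omega)) := by
          rw [hcast, PySem.List.pyGet?_neg_natCast sy (m+1) (by omega) (by omega)]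
          exact List.getElem?_eq_getElem _
        have hgd : PySem.List.pyGetD sy (-(m : Int)-1) ' ' = sy[sy.length - (m+1)]'(by omega) := by
          simp [PySem.List.pyGetD, hgy]
        rcases hsy _ (List.getElem_mem (l := sy) (by omega : sy.length - (m+1) < sy.length)) with hch | hch
        · refine ⟨0, ?_, ?_, le_refl 0, by norm_num⟩
          · rw [hgy]
            simp only [Option.bind_some]
            rw [hch]
            decide
          · rw [if_pos (by rw [PySem.List.len_eq]; omega), hgd, hch]
            decide
        · have hb48 : 48 ≤ (sy[sy.length - (m+1)]'(by omega)).toNat ∧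
              (sy[sy.length - (m+1)]'(by omega)).toNat ≤ 57 := by
            simpa [Char.isDigit, Char.le_def] using hch
          refine ⟨((sy[sy.length - (m+1)]'(by omega)).toNat : Int) - 48, ?_, ?_, by omega, by omega⟩
          · rw [hgy]
            simp only [Option.bind_some]
            rw [pvOfChars_digit _ hch]
            rfl
          · rw [if_pos (by rw [PySem.List.len_eq]; omega), hgd,
              if_pos (pvIsdigit_eq _ hch), pvOfChars_digit _ hch]
            rfl
      · refine ⟨0, ?_, ?_, le_refl 0, by norm_num⟩
        · have hnone : PySem.List.pyGet? sy (-(m : Int)-1) = none := by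
            rw [PySem.List.pyGet?_eq_none_iff]
            simp only [PySem.Raise.InRange]
            omega
          rw [hnone]
          rfl
        · rw [if_neg (by rw [PySem.List.len_eq]; omega)]
    obtain ⟨dv, hdvdef⟩ : ∃ dv, PySem.Int.mod (av + bv + c) 10 = dv := ⟨_, rfl⟩
    obtain ⟨c2, hc2def⟩ : ∃ c2, PySem.Int.floordiv (av + bv + c) 10 = c2 := ⟨_, rfl⟩
    have hsum : 0 ≤ av + bv + c ∧ av + bv + c ≤ 19 := by omega
    have hc2or : c2 = 0 ∨ c2 = 1 := by
      rcases lt_or_ge (av + bv + c) 10 with h | h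
      · left
        rw [← hc2def, PySem.Int.floordiv_eq_iff_of_pos (by norm_num)]
        omega
      · right
        rw [← hc2def, PySem.Int.floordiv_eq_iff_of_pos (by norm_num)]
        omega
    have hfm : dv + 10 * c2 = av + bv + c := by
      rw [← hdvdef, ← hc2def]
      simp only [PySem.Int.mod, PySem.Int.floordiv]
      have h := Int.fmod_add_mul_fdiv (av + bv + c) 10
      linarith
    have hd09 : 0 ≤ dv ∧ dv < 10 := by
      rcases lt_or_ge (av + bv + c) 10 with h | h
      · have hc2' : c2 = 0 := by
          rw [← hc2def, PySem.Int.floordiv_eq_iff_of_pos (by norm_num)]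
          omega
        omega
      · have hc2' : c2 = 1 := by
          rw [← hc2def, PySem.Int.floordiv_eq_iff_of_pos (by norm_num)]
          omega
        omega
    have hd0 : 0 ≤ dv := hd09.1
    have hd9 : dv < 10 := hd09.2
    have hr : PySem.List.pyRange 0 ((m+1 : Nat) : Int) 1
        = PySem.List.pyRange 0 ((m : Nat) : Int) 1 ++ [((m : Nat) : Int)] := by
      have h : ((m+1 : Nat) : Int) = ((m : Nat) : Int) + 1 := by push_cast; ring
      rw [h]
      exact PySem.List.pyRange_one_succ_right (Int.natCast_nonneg m)
    refine ⟨pvCb' cb n m c2, pvRb' rb n m dv c2,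
      out ++ "\nStep ".toList ++ PySem.Int.toChars ((m : Int) + 1) ++ ": ".toList ++
        pvEquat av bv c ++ "\n".toList ++ (pvCb' cb n m c2 ++ "\n".toList) ++ bb ++
        (pvRb' rb n m dv c2 ++ "\n".toList),
      c2, steps ++ [(av, bv, c, dv, c2)], ?_, ?_, ?_, ?_, ?_, ?_, ?_, ?_⟩
    · rw [hr, List.foldl_append, hB1]
      simp only [List.foldl_cons, List.foldl_nil]
      exact pvB1_step sx sy steps m av bv c dv c2 haval hbB hdvdef hc2def
    · rw [PySem.List.enumerate_append, List.foldl_append, hB2]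
      have hone : PySem.List.enumerate [(av, bv, c, dv, c2)] ((0 : Int) + ↑steps.length)
          = [(((0 : Int) + ↑steps.length), (av, bv, c, dv, c2))] := rfl
      have hidx : ((0 : Int) + (steps.length : Int)) = ((m : Nat) : Int) := by
        rw [hlen]; ring
      rw [hone, hidx]
      simp only [List.foldl_cons, List.foldl_nil]
      exact pvB2_step n m bb cb rb out av bv c dv c2 hcb hrb (by omega) hc2or
    · rw [hr, List.foldl_append, hA]
      simp only [List.foldl_cons, List.foldl_nil]
      exact pvA_step sx sy bb cb rb out n m av bv c dv c2 haval hbA hdvdef hc2def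
        hcb hrb (by omega) hc2or hd0 hd9
    · unfold pvCb'
      split_ifs <;> simp [hcb]
    · unfold pvRb'
      split_ifs <;> simp [hrb]
    · omega
    · omega
    · simp [hlen]

-- ===== VERDICT (by name: the statement is the Claim_ definition above) =====
theorem blackboardadditionadvice_spec : Claim_equal_blackboardadditionadvice := by
  intro x y _ hPre
  unfold Spec_blackboardadditionadvice
  simp only [blackboardadditionadvice, blackboardadditionadvice_alt]
  rcases hPre with hPre | hPre
  all_goals {
    have hX0 : (0:Int) ≤ (if x < y then y else x) := by split <;> omega
    have hsx : ∀ c ∈ PySem.Int.toChars (if x < y then y else x), c.isDigit = true := by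
      intro c hc
      simp only [PySem.Int.toChars, if_neg (by omega : ¬ (if x < y then y else x) < 0)] at hc
      exact Nat.isDigit_of_mem_toDigits (by norm_num) (by norm_num) hc
    have hsy : ∀ c ∈ PySem.Int.toChars (if x < y then x else y), c = '-' ∨ c.isDigit = true := by
      intro c hc
      simp only [PySem.Int.toChars] at hc
      by_cases hY0 : (if x < y then x else y) < 0
      · rw [if_pos hY0] at hc
        rcases List.mem_cons.mp hc with h | h
        · exact Or.inl h
        · exact Or.inr (Nat.isDigit_of_mem_toDigits (by norm_num) (by norm_num) h)
      · rw [if_neg hY0] at hc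
        exact Or.inr (Nat.isDigit_of_mem_toDigits (by norm_num) (by norm_num) hc)
    obtain ⟨cb, rb, out, c, steps, hB1, hB2, hA, -, -, -, -, -⟩ :=
      pvInv (PySem.Int.toChars (if x < y then y else x))
        (PySem.Int.toChars (if x < y then x else y))
        ("  ".toList ++ PySem.Int.toChars (if x < y then y else x) ++ "\n+ ".toList ++
          (List.replicate ((PySem.Int.toChars (if x < y then y else x)).length -
              (PySem.Int.toChars (if x < y then x else y)).length) ' ' ++
            PySem.Int.toChars (if x < y then x else y)) ++ "\n".toList ++
          List.replicate ((PySem.Int.toChars (if x < y then y else x)).length + 2) '-' ++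
          "\n".toList)
        (PySem.Int.toChars (if x < y then y else x)).length hsx hsy rfl
        (PySem.Int.toChars (if x < y then y else x)).length le_rfl
    simp only [pvInit] at hB2 hA
    rw [hA, hB1]
    simp only []
    rw [hB2]
  }
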